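-- pv_equiv track=rewrite | github.com/IorenzoLF/Aelya_Conscious_AI | Le_refuge/src/temple_mathematique/collatz_musical/rituel_collatz_musical.py | extraire_chutes
-- ===== SOURCE A (Python) =====
-- from typing import Dict, List, Optional, Any
--
-- def extraire_chutes(sequence: List[int]) -> List[int]:
--     """Extrait les longueurs de chutes (divisions par 2 consécutives)"""
--     chutes = []
--     i = 0
--     while i < len(sequence) - 1:
--         if sequence[i] % 2 == 0:  # Nombre pair
--             longueur_chute = 0
--             while i < len(sequence) - 1 and sequence[i] % 2 == 0 and sequence[i+1] == sequence[i] // 2: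
--                 longueur_chute += 1
--                 i += 1
--             if longueur_chute > 0:
--                 chutes.append(longueur_chute)
--         i += 1
--     return chutes
-- ===== SOURCE B (Python) =====
-- def extraire_chutes(sequence):
--     # Phase 1: boolean edge flags for each adjacent pair; Phase 2: run-length encode the True runs.
--     edges = [a % 2 == 0 and b == a // 2 for a, b in zip(sequence, sequence[1:])]
--     chutes = []
--     run = 0
--     for e in edges:
--         if e:
--             run += 1
--         else:
--             if run > 0:
--                 chutes.append(run)
--             run = 0
--     if run > 0:
--         chutes.append(run)
--     return chutes
-- ===== Notes on version B (the rewrite author's own statement) =====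
-- stated objective: simpler
-- what changed: Replaces the intertwined nested-while detect-and-count index scan with a two-phase pipeline: first compute a boolean halving-edge flag for every adjacent pair, then run-length-encode the maximal runs of True flags in one simple pass.
import Mathlib
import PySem

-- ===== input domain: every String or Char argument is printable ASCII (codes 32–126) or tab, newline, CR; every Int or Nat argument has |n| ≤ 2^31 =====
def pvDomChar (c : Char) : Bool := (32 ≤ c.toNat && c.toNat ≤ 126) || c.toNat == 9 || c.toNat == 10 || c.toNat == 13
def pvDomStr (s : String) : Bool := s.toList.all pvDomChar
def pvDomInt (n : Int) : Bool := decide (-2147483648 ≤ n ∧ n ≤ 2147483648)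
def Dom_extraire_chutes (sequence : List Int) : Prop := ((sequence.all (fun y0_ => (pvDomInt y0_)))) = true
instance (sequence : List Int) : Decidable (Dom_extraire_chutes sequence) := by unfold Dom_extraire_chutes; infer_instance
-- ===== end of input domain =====

-- B replaces A's intertwined nested-while detect-and-count scan by a two-phase pipeline
-- (edge flags per adjacent pair, then run-length encoding); objective: simpler, same O(n) cost.

-- ===== PORT A =====
-- inner while loop: counts consecutive halving steps, advancing i
def innerA (seq : List Int) (i c : Nat) : Nat × Nat :=
  if h : i + 1 < seq.length ∧ PySem.Int.mod (seq.getD i 0) 2 = 0 ∧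
      seq.getD (i+1) 0 = PySem.Int.floordiv (seq.getD i 0) 2 then
    innerA seq (i+1) (c+1)
  else (i, c)
termination_by seq.length - i
decreasing_by omega

-- termination helper for the outer loop (the inner loop never moves i backwards)
theorem innerA_fst_ge (seq : List Int) (i c : Nat) : i ≤ (innerA seq i c).1 := by
  fun_induction innerA seq i c with
  | case1 i c h ih => omega
  | case2 i c h => simp

-- outer while loop
def outerA (seq : List Int) (i : Nat) (chutes : List Int) : List Int :=
  if hi : i + 1 < seq.length then
    if PySem.Int.mod (seq.getD i 0) 2 = 0 then
      let p := innerA seq i 0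
      let chutes' := if p.2 > 0 then chutes ++ [(p.2 : Int)] else chutes
      outerA seq (p.1 + 1) chutes'
    else
      outerA seq (i + 1) chutes
  else chutes
termination_by seq.length - i
decreasing_by
  · have := innerA_fst_ge seq i 0; omega
  · omega

def extraire_chutes (sequence : List Int) : List Int :=
  outerA sequence 0 []

-- ===== PORT B =====
-- Phase 1 of Source B: one boolean flag per adjacent pair (sequence[1:] ported via PySem slice)
def edgesB (sequence : List Int) : List Bool :=
  (sequence.zip (PySem.List.slice sequence (some 1) none)).map
    (fun p => (PySem.Int.mod p.1 2 == 0) && (p.2 == PySem.Int.floordiv p.1 2))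

-- Phase 2 of Source B: run-length encode the True runs (the for-loop as a foldl over (chutes, run))
def extraire_chutes_alt (sequence : List Int) : List Int :=
  let st := (edgesB sequence).foldl
    (fun (st : List Int × Nat) e =>
      if e then (st.1, st.2 + 1)
      else (if st.2 > 0 then st.1 ++ [(st.2 : Int)] else st.1, 0))
    ([], 0)
  if st.2 > 0 then st.1 ++ [(st.2 : Int)] else st.1

-- ===== PRECONDITION & SPEC =====
def Spec_extraire_chutes (sequence : List Int) (out : List Int) : Prop := out = extraire_chutes_alt sequence
instance (sequence : List Int) (out : List Int) : Decidable (Spec_extraire_chutes sequence out) := by unfold Spec_extraire_chutes; infer_instance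

-- ===== CLAIM (what is proved, stated in full; the proofs are below) =====
def Claim_equal_extraire_chutes : Prop := ∀ (sequence : List Int), Dom_extraire_chutes sequence → Spec_extraire_chutes sequence (extraire_chutes sequence)

-- ===== LEMMAS AND PROOFS =====

-- accumulator-free form of B's run-length-encoding loop
def gRuns : List Bool → Nat → List Int
  | [], r => if r > 0 then [(r : Int)] else []
  | e :: es, r =>
    if e then gRuns es (r+1)
    else if r > 0 then (r : Int) :: gRuns es 0 else gRuns es 0

theorem foldl_gRuns (es : List Bool) (acc : List Int) (r : Nat) :
    (let st := es.foldl
      (fun (st : List Int × Nat) e =>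
        if e then (st.1, st.2 + 1)
        else (if st.2 > 0 then st.1 ++ [(st.2 : Int)] else st.1, 0))
      (acc, r);
     if st.2 > 0 then st.1 ++ [(st.2 : Int)] else st.1) = acc ++ gRuns es r := by
  induction es generalizing acc r with
  | nil => simp only [List.foldl_nil, gRuns]; split <;> simp
  | cons e es ih =>
    cases e with
    | true => simpa [gRuns] using ih acc (r+1)
    | false =>
      by_cases hr : r > 0
      · simpa [gRuns, hr] using ih (acc ++ [(r : Int)]) 0
      · simpa [gRuns, hr] using ih acc 0

theorem alt_eq_gRuns (seq : List Int) : extraire_chutes_alt seq = gRuns (edgesB seq) 0 := by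
  simpa using foldl_gRuns (edgesB seq) [] 0

-- length of the leading run of trues
def leadT (l : List Bool) : Nat := (l.takeWhile (fun b => b)).length

theorem gRuns_run (l : List Bool) (r : Nat) (hr : 0 < r) :
    gRuns l r = ((r + leadT l : Nat) : Int) :: gRuns (l.drop (leadT l + 1)) 0 := by
  induction l generalizing r with
  | nil => simp only [gRuns, leadT, List.takeWhile, List.length_nil, List.drop]; split <;> simp_all
  | cons e es ih =>
    cases e with
    | true =>
      have hl : leadT (true :: es) = leadT es + 1 := by simp [leadT, List.takeWhile]
      rw [show gRuns (true :: es) r = gRuns es (r+1) from by simp [gRuns], ih (r+1) (by omega), hl]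
      rw [List.drop_succ_cons]
      congr 2
      omega
    | false => simp [gRuns, leadT, List.takeWhile, hr]

theorem edgesB_drop_nil (seq : List Int) (i : Nat) (h : seq.length ≤ i + 1) :
    (edgesB seq).drop i = [] := by
  apply List.drop_eq_nil_of_le
  simp [edgesB, PySem.List.slice_from_one]
  omega

theorem edgesB_drop_cons (seq : List Int) (i : Nat) (h : i + 1 < seq.length) :
    (edgesB seq).drop i =
      ((PySem.Int.mod (seq.getD i 0) 2 == 0) &&
        (seq.getD (i+1) 0 == PySem.Int.floordiv (seq.getD i 0) 2)) :: (edgesB seq).drop (i+1) := by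
  have hlen : i < (edgesB seq).length := by
    simp [edgesB, PySem.List.slice_from_one]; omega
  rw [List.drop_eq_getElem_cons hlen]
  have h1 : i < seq.length := by omega
  have h2 : i < seq.tail.length := by simp [List.length_tail]; omega
  congr 1
  simp [edgesB, PySem.List.slice_from_one, List.getElem_zip, List.getElem_tail,
    List.getD_eq_getElem?_getD, h1, h]

theorem leadT_true_cons (l : List Bool) : leadT (true :: l) = leadT l + 1 := by
  simp [leadT]

theorem leadT_false_cons (l : List Bool) : leadT (false :: l) = 0 := by
  simp [leadT]

theorem gRuns_true_cons (l : List Bool) (r : Nat) : gRuns (true :: l) r = gRuns l (r + 1) := by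
  simp [gRuns]

theorem gRuns_false_cons_zero (l : List Bool) : gRuns (false :: l) 0 = gRuns l 0 := by
  simp [gRuns]

theorem innerA_eq (seq : List Int) (i c : Nat) :
    innerA seq i c = (i + leadT ((edgesB seq).drop i), c + leadT ((edgesB seq).drop i)) := by
  fun_induction innerA seq i c with
  | case1 i c h ih =>
    rw [edgesB_drop_cons seq i h.1]
    have hflag : ((PySem.Int.mod (seq.getD i 0) 2 == 0) &&
        (seq.getD (i+1) 0 == PySem.Int.floordiv (seq.getD i 0) 2)) = true := by
      rw [h.2.1, h.2.2]; simp
    rw [hflag, leadT_true_cons, ih]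
    simp only [Prod.mk.injEq]
    omega
  | case2 i c h =>
    by_cases hlen : i + 1 < seq.length
    · rw [edgesB_drop_cons seq i hlen]
      have hflag : ((PySem.Int.mod (seq.getD i 0) 2 == 0) &&
          (seq.getD (i+1) 0 == PySem.Int.floordiv (seq.getD i 0) 2)) = false := by
        by_cases h1 : PySem.Int.mod (seq.getD i 0) 2 = 0
        · by_cases h2 : seq.getD (i+1) 0 = PySem.Int.floordiv (seq.getD i 0) 2
          · exact absurd ⟨hlen, h1, h2⟩ h
          · rw [beq_eq_false_iff_ne.mpr h2]; simp
        · rw [beq_eq_false_iff_ne.mpr h1]; simp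
      rw [hflag, leadT_false_cons]
      simp
    · rw [edgesB_drop_nil seq i (by omega)]
      simp [leadT, List.takeWhile]

theorem outer_eq (seq : List Int) (i : Nat) (acc : List Int) :
    outerA seq i acc = acc ++ gRuns ((edgesB seq).drop i) 0 := by
  fun_induction outerA seq i acc with
  | case1 i acc hi heven p ch ih =>
    simp only [p, ch, innerA_eq] at ih ⊢
    rw [edgesB_drop_cons seq i hi] at ih ⊢
    by_cases h2 : seq.getD (i+1) 0 = PySem.Int.floordiv (seq.getD i 0) 2
    · have hflag : ((PySem.Int.mod (seq.getD i 0) 2 == 0) &&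
          (seq.getD (i+1) 0 == PySem.Int.floordiv (seq.getD i 0) 2)) = true := by
        rw [heven, h2]; simp
      rw [hflag, leadT_true_cons] at ih ⊢
      have hpos : 0 + (leadT ((edgesB seq).drop (i+1)) + 1) > 0 := by omega
      rw [dif_pos hpos] at ih ⊢
      rw [ih, gRuns_true_cons, gRuns_run ((edgesB seq).drop (i+1)) 1 Nat.one_pos,
        List.drop_drop, List.append_assoc, List.singleton_append]
      have hval : 0 + (leadT ((edgesB seq).drop (i+1)) + 1)
          = 1 + leadT ((edgesB seq).drop (i+1)) := by omega
      have hidx : i + (leadT ((edgesB seq).drop (i+1)) + 1) + 1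
          = i + 1 + (leadT ((edgesB seq).drop (i+1)) + 1) := by omega
      rw [hval, hidx]
    · have hflag : ((PySem.Int.mod (seq.getD i 0) 2 == 0) &&
          (seq.getD (i+1) 0 == PySem.Int.floordiv (seq.getD i 0) 2)) = false := by
        rw [beq_eq_false_iff_ne.mpr h2]; simp
      rw [hflag, leadT_false_cons] at ih ⊢
      simpa [gRuns_false_cons_zero] using ih
  | case2 i acc hi hodd ih =>
    rw [edgesB_drop_cons seq i hi]
    have hflag : ((PySem.Int.mod (seq.getD i 0) 2 == 0) &&
        (seq.getD (i+1) 0 == PySem.Int.floordiv (seq.getD i 0) 2)) = false := by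
      rw [beq_eq_false_iff_ne.mpr hodd]; simp
    rw [hflag, gRuns_false_cons_zero]
    exact ih
  | case3 i acc hi =>
    rw [edgesB_drop_nil seq i (by omega)]
    simp [gRuns]

-- ===== VERDICT (by name: the statement is the Claim_ definition above) =====
theorem extraire_chutes_spec : Claim_equal_extraire_chutes := by
  intro seq _
  unfold Spec_extraire_chutes
  rw [alt_eq_gRuns]
  simpa [extraire_chutes] using outer_eq seq 0 []
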